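-- pv_equiv track=rewrite | github.com/miliar/Code_Jam_Webscraper | solutions_python/Problem_201/1983.py | stalls
-- ===== SOURCE A (Python) =====
-- def stalls(n, k):
--     best = [0, 0, 0]
--     if n == k:
--         return (0, 0, 0)
--     s = [0 for i in range(0, n)]
--     while k > 0:
--         maximum = 0
--         minimum = 0
--         first = True
--         for i in range(0,n):
--             if s[i] == 0:
--                 left = 0
--                 right = 0
--                 for q in range(i-1,-1,-1):
--                     if s[q] == 0:
--                         left += 1
--                     else:
--                         break
--                 for r in range(i+1,n):
--                     if s[r] == 0:
--                         right += 1
--                     else: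
--                         break
--                 if min(left, right) > minimum or first == True:
--                     best = [i, min(left, right), max(left, right)]
--                     maximum = best[2]
--                     minimum = best[1]
--                     first = False
--                 elif min(left, right) == minimum and max(left, right) > maximum:
--                     best = [i, min(left, right), max(left, right)]
--                     maximum = best[2]
--                     minimum = best[1]
--         s[best[0]] = 1
--         k -= 1
--     return best
-- ===== SOURCE B (Python) =====
-- def _zero_runs(s):
--     # out[i] = length of the run of consecutive zeros immediately before index i
--     out, run = [], 0
--     for x in s:
--         out.append(run)
--         run = run + 1 if x == 0 else 0
--     return out
--
--
-- def stalls(n, k):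
--     if n == k:
--         return (0, 0, 0)
--     s = [0] * n
--     best = [0, 0, 0]
--     while k > 0:
--         left = _zero_runs(s)
--         right = _zero_runs(s[::-1])[::-1]
--         chosen = None  # (lo, hi, position)
--         for i in range(n):
--             if s[i] == 0:
--                 lo, hi = min(left[i], right[i]), max(left[i], right[i])
--                 if chosen is None or (lo, hi) > (chosen[0], chosen[1]):
--                     chosen = (lo, hi, i)
--         if chosen is not None:
--             best = [chosen[2], chosen[0], chosen[1]]
--             s[chosen[2]] = 1
--         k -= 1
--     return best
-- ===== Notes on version B (the rewrite author's own statement) =====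
-- stated objective: faster
-- what changed: Per round, A recomputes the left/right free-neighbour counts of every empty stall by two nested backtracking scans (O(n^2) per placement); B computes them for all stalls at once with two linear zero-run passes (forward, and forward-over-reversed) and then a single argmax pass, giving O(n) per placement.
import Mathlib
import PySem

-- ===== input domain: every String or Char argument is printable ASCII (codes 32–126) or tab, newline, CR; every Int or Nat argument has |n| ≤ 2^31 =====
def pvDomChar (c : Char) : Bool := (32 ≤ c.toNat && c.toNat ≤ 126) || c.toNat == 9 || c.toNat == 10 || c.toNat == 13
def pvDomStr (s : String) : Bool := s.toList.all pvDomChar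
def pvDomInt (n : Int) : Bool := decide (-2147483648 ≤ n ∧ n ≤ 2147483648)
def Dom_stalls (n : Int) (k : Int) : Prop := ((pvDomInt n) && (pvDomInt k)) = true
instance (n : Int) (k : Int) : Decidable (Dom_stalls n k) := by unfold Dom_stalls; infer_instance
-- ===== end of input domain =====

-- B replaces A's per-stall nested left/right scans by two linear zero-run passes per round
-- (same greedy simulation value, O(k·n) instead of O(k·n²)); return-value equivalence only.

-- ===== PORT A =====
-- for q in range(i-1,-1,-1): count zeros leftwards, break at first nonzero
def countL (s : List Int) : Nat → Int
  | 0 => 0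
  | j + 1 => if s.getD j 1 = 0 then countL s j + 1 else 0

-- for r in range(i+1,n): count zeros rightwards, break at first nonzero
def countR (s : List Int) (n : Nat) (r : Nat) : Int :=
  if _h : r < n then (if s.getD r 1 = 0 then countR s n (r + 1) + 1 else 0) else 0
termination_by n - r
decreasing_by omega

-- state = (best, maximum, minimum, first), exactly A's loop variables
def stepA (s : List Int) (n : Nat) (st : (Int × Int × Int) × Int × Int × Bool) (i : Nat) :
    (Int × Int × Int) × Int × Int × Bool :=
  if s.getD i 1 = 0 then
    let left := countL s i
    let right := countR s n (i + 1)
    if min left right > st.2.2.1 ∨ st.2.2.2 = true then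
      ((↑i, min left right, max left right), max left right, min left right, false)
    else if min left right = st.2.2.1 ∧ max left right > st.2.1 then
      ((↑i, min left right, max left right), max left right, min left right, st.2.2.2)
    else st
  else st

def bodyA (s : List Int) (n : Nat) (best : Int × Int × Int) : Int × Int × Int :=
  ((List.range n).foldl (stepA s n) (best, 0, 0, true)).1

def loopA (n : Nat) : Nat → List Int → (Int × Int × Int) → Int × Int × Int
  | 0, _, best => best
  | k + 1, s, best =>
    let b := bodyA s n best
    loopA n k (s.set b.1.toNat 1) b

def stalls (n : Int) (k : Int) : List Int :=
  if n = k then [0, 0, 0]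
  else
    let b := loopA n.toNat k.toNat (List.replicate n.toNat 0) (0, 0, 0)
    [b.1, b.2.1, b.2.2]

-- ===== PORT B =====
-- _zero_runs: out[i] = length of the zero run immediately before index i
def zeroRuns (s : List Int) (run : Int) : List Int :=
  match s with
  | [] => []
  | x :: xs => run :: zeroRuns xs (if x = 0 then run + 1 else 0)

-- chosen = None | (lo, hi, position)
def stepB (s left right : List Int) (ch : Option (Int × Int × Int)) (i : Nat) :
    Option (Int × Int × Int) :=
  if s.getD i 1 = 0 then
    let lo := min (left.getD i 0) (right.getD i 0)
    let hi := max (left.getD i 0) (right.getD i 0)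
    match ch with
    | none => some (lo, hi, (i : Int))
    | some (clo, chi, _) =>
      if lo > clo ∨ (lo = clo ∧ hi > chi) then some (lo, hi, (i : Int)) else ch
  else ch

def bodyB (s : List Int) (n : Nat) : Option (Int × Int × Int) :=
  (List.range n).foldl (stepB s (zeroRuns s 0) ((zeroRuns s.reverse 0).reverse)) none

def loopB (n : Nat) : Nat → List Int → (Int × Int × Int) → Int × Int × Int
  | 0, _, best => best
  | k + 1, s, best =>
    match bodyB s n with
    | none => loopB n k s best
    | some (lo, hi, pos) => loopB n k (s.set pos.toNat 1) (pos, lo, hi)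

def stalls_alt (n : Int) (k : Int) : List Int :=
  if n = k then [0, 0, 0]
  else
    let b := loopB n.toNat k.toNat (List.replicate n.toNat 0) (0, 0, 0)
    [b.1, b.2.1, b.2.2]

-- ===== PRECONDITION & SPEC =====
-- Pre_ excludes only n ≤ 0 with k > 0 and n ≠ k, where Python A raises IndexError (s[0] on an empty list).
def Pre_stalls (n : Int) (k : Int) : Prop := 0 < n ∨ k ≤ 0 ∨ n = k
instance (n : Int) (k : Int) : Decidable (Pre_stalls n k) := by unfold Pre_stalls; infer_instance

def pvWitness_stalls : Int × Int := (5, 3)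

def Spec_stalls (n : Int) (k : Int) (out : List Int) : Prop := out = stalls_alt n k
instance (n : Int) (k : Int) (out : List Int) : Decidable (Spec_stalls n k out) := by
  unfold Spec_stalls; infer_instance

-- ===== CLAIM (what is proved, stated in full; the proofs are below) =====
def Claim_equal_stalls : Prop :=
  ∀ (n : Int) (k : Int), Dom_stalls n k → Pre_stalls n k → Spec_stalls n k (stalls n k)

-- ===== LEMMAS AND PROOFS =====

theorem length_zeroRuns (s : List Int) (r : Int) : (zeroRuns s r).length = s.length := by
  induction s generalizing r with
  | nil => rfl
  | cons x xs ih => simp [zeroRuns, ih]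

theorem zeroRuns_getD_succ (s : List Int) (r : Int) (i : Nat) (h : i + 1 < s.length) :
    (zeroRuns s r).getD (i + 1) 0 =
      if s.getD i 1 = 0 then (zeroRuns s r).getD i 0 + 1 else 0 := by
  induction s generalizing r i with
  | nil => simp at h
  | cons x xs ih =>
    cases i with
    | zero =>
      cases xs with
      | nil => simp at h
      | cons y ys => simp [zeroRuns]
    | succ j =>
      have h' : j + 1 < xs.length := by simpa using h
      simpa [zeroRuns] using ih (if x = 0 then r + 1 else 0) j h'

theorem zeroRuns_getD_eq_countL (s : List Int) (i : Nat) (h : i < s.length) :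
    (zeroRuns s 0).getD i 0 = countL s i := by
  induction i with
  | zero =>
    cases s with
    | nil => simp at h
    | cons x xs => simp [zeroRuns, countL]
  | succ j ih =>
    rw [zeroRuns_getD_succ s 0 j h, countL, ih (by omega)]

theorem getD_reverse (l : List Int) (i : Nat) (d : Int) (h : i < l.length) :
    l.reverse.getD i d = l.getD (l.length - 1 - i) d := by
  rw [List.getD_eq_getElem l.reverse d (by simpa using h),
      List.getD_eq_getElem l d (by omega), List.getElem_reverse]

theorem countL_reverse (s : List Int) (j : Nat) (h : j ≤ s.length) :
    countL s.reverse j = countR s s.length (s.length - j) := by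
  induction j with
  | zero =>
    rw [countR]
    simp [countL]
  | succ j ih =>
    have hj : j < s.length := by omega
    have h1 : s.length - (j + 1) < s.length := by omega
    have h2 : s.length - (j + 1) + 1 = s.length - j := by omega
    have h3 : s.length - 1 - j = s.length - (j + 1) := by omega
    have eqR : countR s s.length (s.length - (j + 1)) =
        if s.getD (s.length - (j + 1)) 1 = 0 then countR s s.length (s.length - j) + 1
        else 0 := by
      rw [countR, dif_pos h1, h2]
    rw [countL, getD_reverse s j 1 (by simpa using hj), ih (by omega), h3, eqR]

theorem rightArr_getD (s : List Int) (i : Nat) (h : i < s.length) :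
    ((zeroRuns s.reverse 0).reverse).getD i 0 = countR s s.length (i + 1) := by
  have hlen : (zeroRuns s.reverse 0).length = s.length := by
    rw [length_zeroRuns, List.length_reverse]
  rw [getD_reverse _ i 0 (by omega), hlen, zeroRuns_getD_eq_countL _ _
      (by rw [List.length_reverse]; omega)]
  rw [countL_reverse s (s.length - 1 - i) (by omega)]
  congr 1
  omega

-- correspondence between A's fold state and B's chosen
def convSt (b : Int × Int × Int) : Option (Int × Int × Int) → (Int × Int × Int) × Int × Int × Bool
  | none => (b, 0, 0, true)
  | some (lo, hi, pos) => ((pos, lo, hi), hi, lo, false)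

theorem step_corresp (s : List Int) (b : Int × Int × Int) (ch : Option (Int × Int × Int))
    (i : Nat) (h : i < s.length) :
    stepA s s.length (convSt b ch) i =
      convSt b (stepB s (zeroRuns s 0) ((zeroRuns s.reverse 0).reverse) ch i) := by
  have hL := zeroRuns_getD_eq_countL s i h
  have hR := rightArr_getD s i h
  cases ch with
  | none =>
    simp only [stepA, stepB, convSt, hL, hR]
    split <;> simp
  | some c =>
    obtain ⟨clo, chi, cpos⟩ := c
    simp only [stepA, stepB, convSt, hL, hR]
    split
    · split_ifs with h1 h2 <;> (simp_all; try omega)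
    · rfl

theorem fold_corresp (s : List Int) (b : Int × Int × Int) (l : List Nat) :
    ∀ (ch : Option (Int × Int × Int)), (∀ i ∈ l, i < s.length) →
    l.foldl (stepA s s.length) (convSt b ch) =
      convSt b (l.foldl (stepB s (zeroRuns s 0) ((zeroRuns s.reverse 0).reverse)) ch) := by
  induction l with
  | nil => intro ch _; rfl
  | cons i t ih =>
    intro ch hl
    simp only [List.foldl_cons]
    rw [step_corresp s b ch i (hl i (by simp))]
    exact ih _ (fun j hj => hl j (by simp [hj]))

theorem bodyA_eq_bodyB (s : List Int) (b : Int × Int × Int) :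
    bodyA s s.length b =
      (match bodyB s s.length with
       | none => b
       | some (lo, hi, pos) => (pos, lo, hi)) := by
  have h := fold_corresp s b (List.range s.length) none (fun i hi => List.mem_range.mp hi)
  unfold bodyA bodyB
  rw [show ((b, 0, 0, true) : (Int × Int × Int) × Int × Int × Bool) = convSt b none from rfl, h]
  cases hb : (List.range s.length).foldl
      (stepB s (zeroRuns s 0) ((zeroRuns s.reverse 0).reverse)) none with
  | none => rfl
  | some c => obtain ⟨lo, hi, pos⟩ := c; rfl

theorem stepB_some (s left right : List Int) (c : Int × Int × Int) (i : Nat) :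
    (stepB s left right (some c) i).isSome := by
  obtain ⟨clo, chi, cpos⟩ := c
  simp only [stepB]
  split
  · split <;> simp
  · simp

theorem foldB_some (s left right : List Int) (l : List Nat) (c : Int × Int × Int) :
    (l.foldl (stepB s left right) (some c)).isSome := by
  induction l generalizing c with
  | nil => simp
  | cons i t ih =>
    simp only [List.foldl_cons]
    cases hs : stepB s left right (some c) i with
    | none => have := stepB_some s left right c i; simp [hs] at this
    | some c' => exact ih c'

theorem foldB_none (s left right : List Int) (l : List Nat)
    (h : l.foldl (stepB s left right) none = none) :
    ∀ i ∈ l, s.getD i 1 ≠ 0 := by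
  induction l with
  | nil => simp
  | cons i t ih =>
    intro j hj
    simp only [List.foldl_cons] at h
    by_cases hz : s.getD i 1 = 0
    · exfalso
      have hstep : stepB s left right none i = some (min (left.getD i 0) (right.getD i 0),
          max (left.getD i 0) (right.getD i 0), (i : Int)) := by
        unfold stepB; rw [if_pos hz]
      rw [hstep] at h
      have hs := foldB_some s left right t (min (left.getD i 0) (right.getD i 0),
          max (left.getD i 0) (right.getD i 0), (i : Int))
      rw [h] at hs
      exact absurd hs (by simp)
    · have hstep : stepB s left right none i = none := by
        unfold stepB; rw [if_neg hz]
      rw [hstep] at h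
      rcases List.mem_cons.mp hj with rfl | hj'
      · exact hz
      · exact ih h j hj'

theorem foldA_id (s : List Int) (n : Nat) (l : List Nat)
    (h : ∀ i ∈ l, s.getD i 1 ≠ 0) (st : (Int × Int × Int) × Int × Int × Bool) :
    l.foldl (stepA s n) st = st := by
  induction l generalizing st with
  | nil => rfl
  | cons i t ih =>
    simp only [List.foldl_cons]
    rw [show stepA s n st i = st by unfold stepA; rw [if_neg (h i (by simp))]]
    exact ih (fun j hj => h j (by simp [hj])) st

theorem noEmpty_set (s : List Int) (m : Nat)
    (h : ∀ i, i < s.length → s.getD i 1 ≠ 0) :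
    ∀ i, i < (s.set m 1).length → (s.set m 1).getD i 1 ≠ 0 := by
  intro i hi
  rw [List.length_set] at hi
  rw [List.getD_eq_getElem _ 1 (by simpa using hi), List.getElem_set]
  split
  · omega
  · rw [← List.getD_eq_getElem s 1 hi]; exact h i hi

theorem loopA_noEmpty (k : Nat) (s : List Int) (best : Int × Int × Int)
    (h : ∀ i, i < s.length → s.getD i 1 ≠ 0) :
    loopA s.length k s best = best := by
  induction k generalizing s best with
  | zero => rfl
  | succ k ih =>
    have hb : bodyA s s.length best = best := by
      unfold bodyA
      rw [foldA_id s s.length (List.range s.length)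
        (fun i hi => h i (List.mem_range.mp hi))]
    rw [loopA, hb]
    have := ih (s.set best.1.toNat 1) best (noEmpty_set s best.1.toNat h)
    rwa [List.length_set] at this

theorem loopB_none (n : Nat) (k : Nat) (s : List Int) (best : Int × Int × Int)
    (h : bodyB s n = none) : loopB n k s best = best := by
  induction k with
  | zero => rfl
  | succ k ih => rw [loopB, h]; exact ih

theorem loop_eq (k : Nat) (s : List Int) (best : Int × Int × Int) :
    loopA s.length k s best = loopB s.length k s best := by
  induction k generalizing s best with
  | zero => rfl
  | succ k ih =>
    rw [loopA, loopB]
    cases hb : bodyB s s.length with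
    | none =>
      have hA : bodyA s s.length best = best := by rw [bodyA_eq_bodyB, hb]
      have hne : ∀ i, i < s.length → s.getD i 1 ≠ 0 := by
        intro i hi
        exact foldB_none s _ _ (List.range s.length) hb i (List.mem_range.mpr hi)
      rw [hA, loopB_none s.length k s best hb]
      have := loopA_noEmpty k (s.set best.1.toNat 1) best
        (noEmpty_set s best.1.toNat hne)
      rwa [List.length_set] at this
    | some c =>
      obtain ⟨lo, hi, pos⟩ := c
      have hA : bodyA s s.length best = (pos, lo, hi) := by rw [bodyA_eq_bodyB, hb]
      simp only [hA]
      have := ih (s.set pos.toNat 1) (pos, lo, hi)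
      rwa [List.length_set] at this

-- ===== VERDICT (by name: the statement is the Claim_ definition above) =====
theorem stalls_spec : Claim_equal_stalls := by
  intro n k _ _
  unfold Spec_stalls stalls stalls_alt
  split
  · rfl
  · have h := loop_eq k.toNat (List.replicate n.toNat 0) (0, 0, 0)
    rw [List.length_replicate] at h
    rw [h]
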